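-- pv_equiv track=rewrite | github.com/ThanksSkeleton/aoc2023 | 3.py | find_all_labels
-- ===== SOURCE A (Python) =====
-- from typing import Tuple
-- from typing import Optional
--
-- def find_all_labels(map: dict[Tuple[int, int], str], x: int, y: int) -> list[int]:
--     # M1.2 M1.1 M1.3
--     # S1 () S2
--     # M2.2 M2.1 M2.3
--     side_points = [(x-1, y), (x+1, y)]
--     middle_points_set = [((x, y-1), (x-1, y-1), (x+1, y-1)), ((x,y+1), (x-1, y+1), (x+1, y+1))]
--     to_return: list[Optional[int]] = []
--     for side in side_points:
--         to_return.append(find_value_total(map, side[0], side[1]))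
--     for middle in middle_points_set:
--         middle_value = find_value_total(map, middle[0][0], middle[0][1])
--         if middle_value is None:
--             to_return.append(find_value_total(map, middle[1][0], middle[1][1]))
--             to_return.append(find_value_total(map, middle[2][0], middle[2][1]))
--         else:
--             to_return.append(middle_value)
--     to_return_real: list[int] = [t for t in to_return if t is not None]
--     return to_return_real
--
-- def find_value_total(map: dict[Tuple[int, int], str], x: int, y:int) -> Optional[int]:
--     raw = find_value_raw(map, x, y)
--     if len(raw) == 0:
--         return None
--     sum = 0
--     raw.reverse()
--     for i, rawvalue in enumerate(raw):
--         sum = sum + int(rawvalue) * pow(10, i)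
--     return sum
--
-- def find_value_raw(map: dict[Tuple[int, int], str], x: int, y:int) -> list[int]:
--     if (x, y) not in map:
--         return []
--     value = map[(x, y)]
--     if not value.isnumeric():
--         return []
--     else:
--         return find_value_raw_direction(map, x-1, y, -1) + [int(value)] + find_value_raw_direction(map, x+1, y, 1)
--
-- def find_value_raw_direction(map: dict[Tuple[int, int], str], x: int, y:int, direction: int) -> list[int]:
--     if (x, y) not in map:
--         return []
--     value = map[(x, y)]
--     if not value.isnumeric():
--         return []
--     else:
--         direction_result = find_value_raw_direction(map, x+direction, y, direction)
--         if direction == -1: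
--             direction_result.append(int(value))
--         else:
--             direction_result.insert(0, int(value))
--         return direction_result
-- ===== SOURCE B (Python) =====
-- def find_all_labels(map, x, y):
--     # B: one iterative value-at-cell scan (find run start, then Horner-accumulate
--     # left-to-right) instead of A's three recursive helpers + reverse + pow.
--     def cell(cx, cy):
--         s = map.get((cx, cy))
--         return s if s is not None and s.isnumeric() else None
--
--     def value_at(cx, cy):
--         if cell(cx, cy) is None:
--             return None
--         sx = cx
--         while cell(sx - 1, cy) is not None:
--             sx -= 1
--         v = 0
--         while cell(sx, cy) is not None:
--             v = v * 10 + int(cell(sx, cy))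
--             sx += 1
--         return v
--
--     out = []
--     for px, py in ((x - 1, y), (x + 1, y)):
--         v = value_at(px, py)
--         if v is not None:
--             out.append(v)
--     for ny in (y - 1, y + 1):
--         v = value_at(x, ny)
--         if v is not None:
--             out.append(v)
--         else:
--             for px in (x - 1, x + 1):
--                 v = value_at(px, ny)
--                 if v is not None:
--                     out.append(v)
--     return out
-- ===== Notes on version B (the rewrite author's own statement) =====
-- stated objective: faster
-- what changed: A's three recursive helpers (collect the digit run into a list via append/insert(0), then reverse it and sum int*pow(10,i)) are replaced by one iterative value-at-cell routine: walk left to the run start, then walk right once accumulating v = v*10 + int(cell); no intermediate lists, no reverse, no pow.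
import Mathlib
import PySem

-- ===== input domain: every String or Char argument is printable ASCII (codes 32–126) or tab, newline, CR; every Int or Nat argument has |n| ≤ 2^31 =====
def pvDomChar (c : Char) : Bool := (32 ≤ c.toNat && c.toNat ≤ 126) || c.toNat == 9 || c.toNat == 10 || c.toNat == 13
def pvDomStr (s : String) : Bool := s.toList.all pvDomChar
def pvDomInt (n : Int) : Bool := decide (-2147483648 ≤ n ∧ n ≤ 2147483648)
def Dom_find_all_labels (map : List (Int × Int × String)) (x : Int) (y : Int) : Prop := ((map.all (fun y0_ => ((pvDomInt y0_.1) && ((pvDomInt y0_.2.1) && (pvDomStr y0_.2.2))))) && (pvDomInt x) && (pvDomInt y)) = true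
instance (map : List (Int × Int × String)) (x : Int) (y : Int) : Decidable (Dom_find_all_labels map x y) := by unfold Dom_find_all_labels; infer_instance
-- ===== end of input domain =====

-- B replaces A's three recursive run-collecting helpers (reverse + pow(10,i) digit sum,
-- list append/insert(0) per digit) by one iterative value-at-cell scan: walk left to the
-- run start, then Horner-accumulate v = v*10 + int(cell) walking right (objective: faster).

-- shared argument decoding: the Python parameter IS a dict keyed by (x, y)
def pvDict (map : List (Int × Int × String)) : PySem.Dict (Int × Int) String :=
  PySem.Dict.ofList (map.map (fun e => ((e.1, e.2.1), e.2.2)))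

-- int(value); the call sites guard with isnumeric, so on the ASCII domain the parse succeeds
def pvInt (s : String) : Int := (PySem.Int.ofStr? s).getD 0

-- ===== PORT A =====
-- recursion on fuel: each recursive step consumes a distinct key of the dict, so
-- fuel = d.size + 1 is never exhausted (str.isnumeric = Str.strIsdigit on the ASCII domain)
def find_value_raw_direction (d : PySem.Dict (Int × Int) String) (fuel : Nat)
    (x y direction : Int) : List Int :=
  match fuel with
  | 0 => []
  | fuel + 1 =>
    match d.get? (x, y) with
    | none => []                                        -- (x, y) not in map
    | some value =>
      if !(PySem.Str.strIsdigit value) then []          -- not value.isnumeric()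
      else
        let direction_result := find_value_raw_direction d fuel (x + direction) y direction
        if direction = -1 then direction_result ++ [pvInt value]
        else PySem.List.insert direction_result 0 (pvInt value)

def find_value_raw (d : PySem.Dict (Int × Int) String) (fuel : Nat) (x y : Int) : List Int :=
  match d.get? (x, y) with
  | none => []
  | some value =>
    if !(PySem.Str.strIsdigit value) then []
    else find_value_raw_direction d fuel (x - 1) y (-1) ++ [pvInt value]
           ++ find_value_raw_direction d fuel (x + 1) y 1

def find_value_total (d : PySem.Dict (Int × Int) String) (fuel : Nat) (x y : Int) : Option Int :=
  let raw := find_value_raw d fuel x y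
  if raw.length = 0 then none
  else some ((PySem.List.enumerate raw.reverse 0).foldl
               (fun s p => s + p.2 * 10 ^ p.1.toNat) 0)   -- sum += int(rawvalue) * pow(10, i)

def find_all_labels (map : List (Int × Int × String)) (x : Int) (y : Int) : List Int :=
  let d := pvDict map
  let fuel := d.size + 1
  let side_points := [(x - 1, y), (x + 1, y)]
  let middle_points_set := [((x, y - 1), (x - 1, y - 1), (x + 1, y - 1)),
                            ((x, y + 1), (x - 1, y + 1), (x + 1, y + 1))]
  let to_return : List (Option Int) :=
    side_points.foldl (fun acc side => acc ++ [find_value_total d fuel side.1 side.2]) []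
  let to_return :=
    middle_points_set.foldl (fun acc middle =>
      match find_value_total d fuel middle.1.1 middle.1.2 with
      | none => acc ++ [find_value_total d fuel middle.2.1.1 middle.2.1.2]
                    ++ [find_value_total d fuel middle.2.2.1 middle.2.2.2]
      | some middle_value => acc ++ [some middle_value]) to_return
  to_return.filterMap id                                  -- [t for t in to_return if t is not None]

-- ===== PORT B =====
-- cell(cx, cy): the cell's string if present and numeric, else None
def pvCell (d : PySem.Dict (Int × Int) String) (cx cy : Int) : Option String :=
  match d.get? (cx, cy) with
  | some s => if PySem.Str.strIsdigit s then some s else none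
  | none => none

-- while cell(sx-1, cy) is not None: sx -= 1   (fuel as above: never exhausted)
def pvRunStart (d : PySem.Dict (Int × Int) String) (fuel : Nat) (sx cy : Int) : Int :=
  match fuel with
  | 0 => sx
  | fuel + 1 => if (pvCell d (sx - 1) cy).isSome then pvRunStart d fuel (sx - 1) cy else sx

-- while cell(sx, cy) is not None: v = v*10 + int(cell); sx += 1
def pvRunValue (d : PySem.Dict (Int × Int) String) (fuel : Nat) (sx cy v : Int) : Int :=
  match fuel with
  | 0 => v
  | fuel + 1 =>
    match pvCell d sx cy with
    | some s => pvRunValue d fuel (sx + 1) cy (v * 10 + pvInt s)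
    | none => v

def pvValueAt (d : PySem.Dict (Int × Int) String) (fuel : Nat) (cx cy : Int) : Option Int :=
  if (pvCell d cx cy).isNone then none
  else some (pvRunValue d fuel (pvRunStart d fuel cx cy) cy 0)

def find_all_labels_alt (map : List (Int × Int × String)) (x : Int) (y : Int) : List Int :=
  let d := pvDict map
  let fuel := d.size + 1
  let out := [(x - 1, y), (x + 1, y)].foldl (fun acc p =>
      match pvValueAt d fuel p.1 p.2 with
      | some v => acc ++ [v]
      | none => acc) []
  [y - 1, y + 1].foldl (fun acc ny =>
      match pvValueAt d fuel x ny with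
      | some v => acc ++ [v]
      | none => [x - 1, x + 1].foldl (fun acc px =>
          match pvValueAt d fuel px ny with
          | some v => acc ++ [v]
          | none => acc) acc) out

-- ===== PRECONDITION & SPEC =====
def Spec_find_all_labels (map : List (Int × Int × String)) (x : Int) (y : Int) (out : List Int) : Prop := out = find_all_labels_alt map x y
instance (map : List (Int × Int × String)) (x : Int) (y : Int) (out : List Int) : Decidable (Spec_find_all_labels map x y out) := by unfold Spec_find_all_labels; infer_instance

-- ===== CLAIM (what is proved, stated in full; the proofs are below) =====
def Claim_equal_find_all_labels : Prop := ∀ (map : List (Int × Int × String)) (x : Int) (y : Int), Dom_find_all_labels map x y → Spec_find_all_labels map x y (find_all_labels map x y)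

-- ===== LEMMAS AND PROOFS =====

-- the digit (as Int) at a cell, or none
def pvDig (d : PySem.Dict (Int × Int) String) (cy x : Int) : Option Int :=
  (pvCell d x cy).map pvInt

-- proof-level run lists: digits rightward / leftward from x (left-to-right order)
def rawR (d : PySem.Dict (Int × Int) String) (cy : Int) (k : Nat) (x : Int) : List Int :=
  match k with
  | 0 => []
  | k + 1 =>
    match pvDig d cy x with
    | some v => v :: rawR d cy k (x + 1)
    | none => []

def rawL (d : PySem.Dict (Int × Int) String) (cy : Int) (k : Nat) (x : Int) : List Int :=
  match k with
  | 0 => []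
  | k + 1 =>
    match pvDig d cy x with
    | some v => rawL d cy k (x - 1) ++ [v]
    | none => []

def hornerAcc (a : Int) (l : List Int) : Int := l.foldl (fun a v => a * 10 + v) a

def rh : List Int → Int
  | [] => 0
  | v :: t => v + 10 * rh t

theorem bridgeR (d : PySem.Dict (Int × Int) String) (k : Nat) :
    ∀ x y, find_value_raw_direction d k x y 1 = rawR d y k x := by
  induction k with
  | zero => intro x y; rfl
  | succ k ih =>
    intro x y
    simp only [find_value_raw_direction, rawR, pvDig, pvCell]
    cases d.get? (x, y) with
    | none => rfl
    | some s =>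
      by_cases h : PySem.Chars.strIsdigit s.toList = true <;>
        simp [h, ih, PySem.List.insert_zero]

theorem bridgeL (d : PySem.Dict (Int × Int) String) (k : Nat) :
    ∀ x y, find_value_raw_direction d k x y (-1) = rawL d y k x := by
  induction k with
  | zero => intro x y; rfl
  | succ k ih =>
    intro x y
    simp only [find_value_raw_direction, rawL, pvDig, pvCell]
    cases d.get? (x, y) with
    | none => rfl
    | some s =>
      by_cases h : PySem.Chars.strIsdigit s.toList = true <;>
        simp [h, ih, sub_eq_add_neg]

theorem runValue_eq (d : PySem.Dict (Int × Int) String) (cy : Int) (k : Nat) :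
    ∀ x v, pvRunValue d k x cy v = hornerAcc v (rawR d cy k x) := by
  induction k with
  | zero => intro x v; rfl
  | succ k ih =>
    intro x v
    simp only [pvRunValue, rawR, pvDig]
    cases h : pvCell d x cy with
    | none => rfl
    | some s => simp [ih, hornerAcc]

theorem rawR_succ (d : PySem.Dict (Int × Int) String) (cy : Int) (k : Nat) (x v : Int)
    (h : pvDig d cy x = some v) : rawR d cy (k + 1) x = v :: rawR d cy k (x + 1) := by
  simp only [rawR]; rw [h]

-- growth: one more unit of fuel either changes nothing or the whole fuel was digits
theorem growR (d : PySem.Dict (Int × Int) String) (cy : Int) (k : Nat) :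
    ∀ x, rawR d cy (k + 1) x = rawR d cy k x ∨
      ∀ i : Nat, i ≤ k → (pvDig d cy (x + i)).isSome := by
  induction k with
  | zero =>
    intro x
    cases h : pvDig d cy x with
    | none => left; simp [rawR, h]
    | some v =>
      right; intro i hi
      interval_cases i; simp [h]
  | succ k ih =>
    intro x
    cases h : pvDig d cy x with
    | none => left; simp [rawR, h]
    | some v =>
      rcases ih (x + 1) with h1 | h1
      · left
        rw [rawR_succ d cy (k + 1) x v h, rawR_succ d cy k x v h, h1]
      · right
        intro i hi
        cases i with
        | zero => simp [h]
        | succ i =>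
          have := h1 i (by omega)
          have e : x + (i + 1 : Nat) = x + 1 + (i : Nat) := by push_cast; ring
          rwa [e]

theorem dig_mem_keys (d : PySem.Dict (Int × Int) String) (cy x : Int)
    (h : (pvDig d cy x).isSome) : (x, cy) ∈ d.keys := by
  unfold pvDig pvCell at h
  cases hg : d.get? (x, cy) with
  | none =>
    rw [hg] at h; simp at h
  | some s =>
    have := PySem.Dict.get?_eq_none_iff_not_mem_keys (d := d) (k := (x, cy))
    by_contra hmem
    have : d.get? (x, cy) = none := this.mpr hmem
    rw [this] at hg; cases hg

theorem run_le_size (d : PySem.Dict (Int × Int) String) (cy : Int) (k : Nat) (x : Int)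
    (h : ∀ i : Nat, i ≤ k → (pvDig d cy (x + i)).isSome) : k + 1 ≤ d.size := by
  classical
  have hnd : ((List.range (k + 1)).map (fun i : Nat => ((x + i : Int), cy))).Nodup := by
    refine List.Nodup.map ?_ List.nodup_range
    intro a b hab
    simp only [Prod.mk.injEq] at hab
    have := hab.1
    omega
  have hsub : ∀ p ∈ (List.range (k + 1)).map (fun i : Nat => ((x + i : Int), cy)),
      p ∈ d.keys := by
    intro p hp
    simp only [List.mem_map, List.mem_range] at hp
    obtain ⟨i, hi, rfl⟩ := hp
    exact dig_mem_keys d cy _ (h i (by omega))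
  have h1 : ((List.range (k + 1)).map (fun i : Nat => ((x + i : Int), cy))).toFinset.card
      = k + 1 := by
    rw [List.toFinset_card_of_nodup hnd]; simp
  have h2 : ((List.range (k + 1)).map (fun i : Nat => ((x + i : Int), cy))).toFinset
      ⊆ d.keys.toFinset := by
    intro p hp
    rw [List.mem_toFinset] at hp ⊢
    exact hsub p hp
  have h3 : d.keys.toFinset.card ≤ d.keys.length := d.keys.toFinset_card_le
  have h4 := Finset.card_le_card h2
  have hk : d.keys.length = d.size := by
    simp [PySem.Dict.keys, PySem.Dict.size]
  omega

theorem stabR (d : PySem.Dict (Int × Int) String) (cy : Int) (k : Nat) (x : Int)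
    (h : d.size ≤ k) : rawR d cy (k + 1) x = rawR d cy k x := by
  rcases growR d cy k x with h1 | h1
  · exact h1
  · exact absurd (run_le_size d cy k x h1) (by omega)

-- the right run from the found start is the left run ++ the right run from x
theorem key_start (d : PySem.Dict (Int × Int) String) (cy : Int) (k : Nat) :
    ∀ x, rawR d cy (d.size + 1) (pvRunStart d k x cy) =
      rawL d cy k (x - 1) ++ rawR d cy (d.size + 1) x := by
  induction k with
  | zero => intro x; simp [pvRunStart, rawL]
  | succ k ih =>
    intro x
    simp only [pvRunStart, rawL]
    cases h : pvDig d cy (x - 1) with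
    | none =>
      have hc : (pvCell d (x - 1) cy).isSome = false := by
        unfold pvDig at h
        cases hcc : pvCell d (x - 1) cy with
        | none => rfl
        | some s => rw [hcc] at h; cases h
      simp [hc]
    | some v =>
      have hc : (pvCell d (x - 1) cy).isSome = true := by
        unfold pvDig at h
        cases hcc : pvCell d (x - 1) cy with
        | none => rw [hcc] at h; cases h
        | some s => rfl
      rw [if_pos hc, ih (x - 1)]
      have hstep : rawR d cy (d.size + 1) (x - 1) = v :: rawR d cy (d.size + 1) x := by
        rw [rawR_succ d cy d.size (x - 1) v h, show x - 1 + 1 = x by ring,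
            stabR d cy d.size x (le_refl _)]
      rw [hstep]
      simp

-- A's enumerate/pow sum over the reversed list is Horner evaluation
theorem enum_pow_aux (l : List Int) :
    ∀ (off : Nat) (s : Int),
      (PySem.List.enumerate l (off : Int)).foldl (fun s p => s + p.2 * 10 ^ p.1.toNat) s
        = s + 10 ^ off * rh l := by
  induction l with
  | nil => intro off s; simp [PySem.List.enumerate_nil, rh]
  | cons v t ih =>
    intro off s
    rw [PySem.List.enumerate_cons]
    simp only [List.foldl_cons]
    have : ((off : Int) + 1) = ((off + 1 : Nat) : Int) := by push_cast; ring
    rw [this, ih (off + 1)]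
    simp only [rh, Int.toNat_natCast]
    ring

theorem rh_append (u : List Int) (v : Int) : rh (u ++ [v]) = rh u + v * 10 ^ u.length := by
  induction u with
  | nil => simp [rh]
  | cons w t ih => simp [rh, ih, pow_succ]; ring

theorem horner_eq_rh_reverse (l : List Int) :
    ∀ a : Int, hornerAcc a l = a * 10 ^ l.length + rh l.reverse := by
  induction l with
  | nil => intro a; simp [hornerAcc, rh]
  | cons v t ih =>
    intro a
    have : hornerAcc a (v :: t) = hornerAcc (a * 10 + v) t := rfl
    rw [this, ih, List.reverse_cons, rh_append]
    simp [pow_succ, List.length_reverse]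
    ring

theorem asum_eq_horner (l : List Int) :
    (PySem.List.enumerate l.reverse 0).foldl (fun s p => s + p.2 * 10 ^ p.1.toNat) 0
      = hornerAcc 0 l := by
  have h := enum_pow_aux l.reverse 0 0
  simp only [Nat.cast_zero] at h
  rw [h, horner_eq_rh_reverse l 0]
  simp

-- find_value_raw in terms of the run lists
theorem raw_eq (d : PySem.Dict (Int × Int) String) (k : Nat) (x y : Int) :
    find_value_raw d k x y =
      match pvDig d y x with
      | some v => rawL d y k (x - 1) ++ [v] ++ rawR d y k (x + 1)
      | none => [] := by
  simp only [find_value_raw, pvDig, pvCell]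
  cases d.get? (x, y) with
  | none => rfl
  | some s =>
    by_cases h : PySem.Chars.strIsdigit s.toList = true <;>
      simp [h, bridgeR, bridgeL]

-- the central per-cell equality, at the fuel both ports use
theorem total_eq_valueAt (d : PySem.Dict (Int × Int) String) (x y : Int) :
    find_value_total d (d.size + 1) x y = pvValueAt d (d.size + 1) x y := by
  unfold find_value_total pvValueAt
  rw [raw_eq]
  cases h : pvDig d y x with
  | none =>
    have hc : (pvCell d x y).isNone = true := by
      unfold pvDig at h
      cases hcc : pvCell d x y with
      | none => rfl
      | some s => rw [hcc] at h; cases h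
    simp [hc]
  | some v =>
    have hc : (pvCell d x y).isNone = false := by
      unfold pvDig at h
      cases hcc : pvCell d x y with
      | none => rw [hcc] at h; cases h
      | some s => rfl
    have hlen : (rawL d y (d.size + 1) (x - 1) ++ [v] ++ rawR d y (d.size + 1) (x + 1)).length ≠ 0 := by
      simp
    rw [if_neg hlen, if_neg (by simp [hc])]
    congr 1
    rw [asum_eq_horner, runValue_eq, key_start]
    have hx : rawR d y (d.size + 1) x = v :: rawR d y (d.size + 1) (x + 1) := by
      rw [rawR_succ d y d.size x v h, stabR d y d.size (x + 1) (le_refl _)]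
    rw [hx]
    simp

-- ===== VERDICT (by name: the statement is the Claim_ definition above) =====
theorem find_all_labels_spec : Claim_equal_find_all_labels := by
  intro map x y _
  unfold Spec_find_all_labels find_all_labels find_all_labels_alt
  set d := pvDict map with hd
  simp only [List.foldl_cons, List.foldl_nil, total_eq_valueAt]
  rcases h1 : pvValueAt d (d.size + 1) (x - 1) y with _ | v1 <;>
  rcases h2 : pvValueAt d (d.size + 1) (x + 1) y with _ | v2 <;>
  rcases h3 : pvValueAt d (d.size + 1) x (y - 1) with _ | v3 <;>
  rcases h4 : pvValueAt d (d.size + 1) x (y + 1) with _ | v4 <;>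
  rcases h5 : pvValueAt d (d.size + 1) (x - 1) (y - 1) with _ | v5 <;>
  rcases h6 : pvValueAt d (d.size + 1) (x + 1) (y - 1) with _ | v6 <;>
  rcases h7 : pvValueAt d (d.size + 1) (x - 1) (y + 1) with _ | v7 <;>
  rcases h8 : pvValueAt d (d.size + 1) (x + 1) (y + 1) with _ | v8 <;>
    simp [List.filterMap]
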